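-- pv_equiv track=rewrite | github.com/AkiraDemenech/sorteios-separadores-coisadores | __equipes__.py | bordas
-- ===== SOURCE A (Python) =====
-- def bordas (texto, soletras=False):
-- 	i = 0
-- 	j = []
-- 	for inc in (1,-1):
-- 		while True:
-- 			if i >= len(texto):
-- 				return 0,-1
-- 			if soletras:
-- 				if texto[i].isalpha():
-- 					break
-- 			else:
-- 				if texto[i].isalnum():#.isspace():
-- 					break
-- 			i += inc
-- 		j.append(i)
-- 		i = len(texto) - 1
-- 	return j
-- ===== SOURCE B (Python) =====
-- def bordas(texto, soletras=False):
-- 	pred = str.isalpha if soletras else str.isalnum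
-- 	idxs = [i for i, c in enumerate(texto) if pred(c)]
-- 	if not idxs:
-- 		return 0, -1
-- 	return [idxs[0], idxs[-1]]
-- ===== Notes on version B (the rewrite author's own statement) =====
-- stated objective: simpler
-- what changed: replaces A's two short-circuiting forward/backward while-loops with index arithmetic by one full enumerate sweep that collects all matching indices and reads off the first and last
import Mathlib
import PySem

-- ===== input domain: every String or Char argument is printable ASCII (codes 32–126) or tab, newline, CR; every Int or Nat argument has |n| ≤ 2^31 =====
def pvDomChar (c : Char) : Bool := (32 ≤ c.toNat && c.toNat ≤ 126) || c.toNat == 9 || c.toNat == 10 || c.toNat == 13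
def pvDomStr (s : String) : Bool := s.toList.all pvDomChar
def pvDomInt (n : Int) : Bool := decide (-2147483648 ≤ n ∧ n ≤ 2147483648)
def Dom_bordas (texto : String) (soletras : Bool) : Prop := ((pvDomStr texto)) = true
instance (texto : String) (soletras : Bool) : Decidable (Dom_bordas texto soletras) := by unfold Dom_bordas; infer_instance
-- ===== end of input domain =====

-- B replaces A's two short-circuiting forward/backward scans by one full sweep that
-- collects every matching index and reads off the first and last (objective: simpler).

-- ===== PORT A =====
-- A's inner `while True` loop: index i stepped by inc until i >= len (→ none, A's
-- (0,-1) path) or texto[i] matches; fuel bounds the iterations (len+1 suffices for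
-- every loop execution A actually performs); pyGet? none = IndexError (unreachable).
def bordasScan (cs : List Char) (soletras : Bool) (inc : Int) : Int → Nat → Option Int
  | _, 0 => none
  | i, fuel+1 =>
    if i ≥ (cs.length : Int) then none
    else
      match PySem.List.pyGet? cs i with
      | none => none
      | some c =>
        if (if soletras then PySem.Chars.isalpha c else PySem.Chars.isalnum c)
        then some i
        else bordasScan cs soletras inc (i + inc) fuel

def bordas (texto : String) (soletras : Bool) : List Int :=
  let cs := texto.toList
  match bordasScan cs soletras 1 0 (cs.length + 1) with
  | none => [0, -1]
  | some f =>
    match bordasScan cs soletras (-1) ((cs.length : Int) - 1) (cs.length + 1) with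
    | none => [0, -1]
    | some l => [f, l]

-- ===== PORT B =====
def bordas_alt (texto : String) (soletras : Bool) : List Int :=
  let idxs := ((PySem.List.enumerate texto.toList 0).filter
      (fun p => if soletras then PySem.Chars.isalpha p.2 else PySem.Chars.isalnum p.2)).map (·.1)
  match idxs with
  | [] => [0, -1]
  | a :: rest => [a, (a :: rest).getLast (List.cons_ne_nil a rest)]

-- ===== PRECONDITION & SPEC =====
def Spec_bordas (texto : String) (soletras : Bool) (out : List Int) : Prop := out = bordas_alt texto soletras
instance (texto : String) (soletras : Bool) (out : List Int) : Decidable (Spec_bordas texto soletras out) := by unfold Spec_bordas; infer_instance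

-- ===== CLAIM (what is proved, stated in full; the proofs are below) =====
def Claim_equal_bordas : Prop := ∀ (texto : String) (soletras : Bool), Dom_bordas texto soletras → Spec_bordas texto soletras (bordas texto soletras)

-- ===== LEMMAS AND PROOFS =====

-- the predicate both ports test
def bordasPr (soletras : Bool) (c : Char) : Bool :=
  if soletras then PySem.Chars.isalpha c else PySem.Chars.isalnum c

-- forward scan from position pre.length finds the first matching index there or beyond
lemma bordasScan_fwd (s : Bool) :
    ∀ (suf pre : List Char) (fuel : Nat), suf.length < fuel →
    bordasScan (pre ++ suf) s 1 (pre.length : Int) fuel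
      = (((PySem.List.enumerate suf (pre.length : Int)).filter
            (fun q => bordasPr s q.2)).map (·.1)).head? := by
  intro suf
  induction suf with
  | nil =>
      intro pre fuel hf
      cases fuel with
      | zero => omega
      | succ n => simp [bordasScan, PySem.List.enumerate]
  | cons c rest ih =>
      intro pre fuel hf
      cases fuel with
      | zero => simp at hf
      | succ n =>
          have hlt : ((pre.length : Int) ≥ ((pre ++ c :: rest).length : Int)) = False := by
            simp only [List.length_append, List.length_cons, eq_iff_iff, iff_false, not_le]
            push_cast; omega
          rw [bordasScan]
          simp only [hlt, if_false, PySem.List.pyGet?_append_length]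
          by_cases hp : (if s then PySem.Chars.isalpha c else PySem.Chars.isalnum c) = true
          · have hpcT : bordasPr s c = true := hp
            simp [hp, PySem.List.enumerate_cons, List.filter_cons, hpcT]
          · have hp' : (if s then PySem.Chars.isalpha c else PySem.Chars.isalnum c) = false :=
              by simpa using hp
            have hpc : bordasPr s c = false := hp'
            rw [hp']
            simp only [Bool.false_eq_true, if_false]
            have h2 : (pre.length : Int) + 1 = ((pre ++ [c]).length : Int) := by simp
            rw [h2]
            have hassoc : pre ++ c :: rest = (pre ++ [c]) ++ rest := by simp
            rw [hassoc, ih (pre ++ [c]) n (by simp at hf ⊢; omega)]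
            simp [PySem.List.enumerate_cons, List.filter_cons, hpc]

-- backward scan from position pre.length - 1 finds the last matching index in pre,
-- provided one exists (the suffix suf beyond the start position is never read)
lemma bordasScan_bwd (s : Bool) :
    ∀ (pre suf : List Char) (fuel : Nat), pre.length ≤ fuel →
    (∃ c ∈ pre, bordasPr s c = true) →
    bordasScan (pre ++ suf) s (-1) ((pre.length : Int) - 1) fuel
      = (((PySem.List.enumerate pre 0).filter
            (fun q => bordasPr s q.2)).map (·.1)).getLast? := by
  intro pre
  induction pre using List.reverseRecOn with
  | nil => intro suf fuel _ hex; simp at hex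
  | append_singleton init c ih =>
      intro suf fuel hfuel hex
      cases fuel with
      | zero => simp at hfuel
      | succ n =>
          have hlen : (((init ++ [c]).length : Int)) - 1 = (init.length : Int) := by
            simp
          have hassoc : (init ++ [c]) ++ suf = init ++ (c :: suf) := by simp
          rw [hlen, hassoc, bordasScan]
          have hlt : ((init.length : Int) ≥ ((init ++ c :: suf).length : Int)) = False := by
            simp only [List.length_append, List.length_cons, eq_iff_iff, iff_false, not_le]
            push_cast; omega
          simp only [hlt, if_false, PySem.List.pyGet?_append_length]
          by_cases hp : (if s then PySem.Chars.isalpha c else PySem.Chars.isalnum c) = true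
          · have hpcT : bordasPr s c = true := hp
            simp [hp, PySem.List.enumerate_append, List.filter_append,
                  PySem.List.enumerate_cons, List.filter_cons, hpcT,
                  PySem.List.enumerate_nil]
          · have hp' : (if s then PySem.Chars.isalpha c else PySem.Chars.isalnum c) = false :=
              by simpa using hp
            have hpc : bordasPr s c = false := hp'
            have hex' : ∃ d ∈ init, bordasPr s d = true := by
              obtain ⟨d, hd, hdp⟩ := hex
              rcases List.mem_append.mp hd with h | h
              · exact ⟨d, h, hdp⟩
              · simp at h; subst h; rw [hpc] at hdp; simp at hdp
            rw [hp']
            simp only [Bool.false_eq_true, if_false]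
            have h1 : (init.length : Int) + -1 = (init.length : Int) - 1 := by ring
            rw [h1, ih (c :: suf) n (by simp at hfuel ⊢; omega) hex']
            simp [PySem.List.enumerate_append, List.filter_append,
                  PySem.List.enumerate_cons, List.filter_cons, hpc,
                  PySem.List.enumerate_nil]

-- a nonempty index list yields a matching character in the text
lemma bordas_ex_of_ne_nil (s : Bool) (cs : List Char)
    (h : ((PySem.List.enumerate cs 0).filter (fun q => bordasPr s q.2)).map (·.1) ≠ []) :
    ∃ c ∈ cs, bordasPr s c = true := by
  rcases List.exists_mem_of_ne_nil _ h with ⟨x, hx⟩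
  rcases List.mem_map.mp hx with ⟨q, hq, _⟩
  have hqf := List.of_mem_filter hq
  have hqm := List.mem_of_mem_filter hq
  rcases (PySem.List.mem_enumerate_iff _ _ _).mp hqm with ⟨k, hk, hqe⟩
  subst hqe
  exact ⟨cs[k], List.getElem_mem hk, hqf⟩

-- ===== VERDICT (by name: the statement is the Claim_ definition above) =====
theorem bordas_spec : Claim_equal_bordas := by
  intro texto soletras _
  unfold Spec_bordas bordas bordas_alt
  have hpr : (fun (p : Int × Char) => if soletras = true then PySem.Chars.isalpha p.2
                else PySem.Chars.isalnum p.2) = (fun q => bordasPr soletras q.2) := rfl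
  set cs := texto.toList with hcs
  have hfwd := bordasScan_fwd soletras cs [] (cs.length + 1) (by omega)
  simp only [List.nil_append, List.length_nil, Int.natCast_zero] at hfwd
  simp only [hpr]
  set idxs := ((PySem.List.enumerate cs 0).filter (fun q => bordasPr soletras q.2)).map (·.1)
      with hidxs
  rw [hfwd]
  rcases hm : idxs with _ | ⟨a, rest⟩
  · simp
  · have hex : ∃ c ∈ cs, bordasPr soletras c = true :=
      bordas_ex_of_ne_nil soletras cs (by rw [← hidxs, hm]; simp)
    have hbwd := bordasScan_bwd soletras cs [] (cs.length + 1) (by omega) hex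
    simp only [List.append_nil] at hbwd
    rw [← hidxs, hm] at hbwd
    rw [List.getLast?_eq_some_getLast (List.cons_ne_nil a rest)] at hbwd
    simp [hbwd]
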